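-- pv_equiv track=rewrite | github.com/tomasmansilla/python_algorithms | logic/sentence.py | separate_parenthesis
-- ===== SOURCE A (Python) =====
-- def separate_parenthesis(sentence):
--     """Add space between parenthesis."""
--     new_sentence = ''
--     for ch in sentence:
--         if ch == '(' or ch == ')':
--             new_sentence += f' {ch} '
--         else:
--             new_sentence += ch
--
--     return new_sentence
-- ===== SOURCE B (Python) =====
-- def separate_parenthesis(sentence):
--     """Add space between parenthesis."""
--     return sentence.replace('(', ' ( ').replace(')', ' ) ')
-- ===== Notes on version B (the rewrite author's own statement) =====
-- stated objective: faster
-- what changed: Replaces the per-character accumulation loop with two whole-string str.replace substitutions (one per parenthesis kind), which commute since the two target characters are distinct.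
import Mathlib
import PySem

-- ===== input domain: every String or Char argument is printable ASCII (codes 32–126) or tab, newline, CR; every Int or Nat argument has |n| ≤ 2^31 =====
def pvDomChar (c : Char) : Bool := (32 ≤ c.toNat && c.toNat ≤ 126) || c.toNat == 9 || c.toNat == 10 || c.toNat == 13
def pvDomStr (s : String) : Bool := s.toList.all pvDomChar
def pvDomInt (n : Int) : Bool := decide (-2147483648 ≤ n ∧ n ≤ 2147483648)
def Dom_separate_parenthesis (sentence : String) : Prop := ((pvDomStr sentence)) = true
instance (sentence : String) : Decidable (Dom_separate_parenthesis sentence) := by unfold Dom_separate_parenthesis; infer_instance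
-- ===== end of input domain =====

-- B replaces A's per-character accumulation loop with two whole-string replace passes
-- (one per parenthesis kind); they commute since '(' and ')' are distinct — more idiomatic.


-- ===== PORT A =====
-- literal port of A's loop: fold over the characters, appending to the accumulator string
def separate_parenthesis (sentence : String) : String :=
  sentence.toList.foldl
    (fun new_sentence ch =>
      if ch == '(' || ch == ')' then
        new_sentence ++ (" " ++ String.ofList [ch] ++ " ")
      else
        new_sentence ++ String.ofList [ch])
    ""

-- ===== PORT B =====
def separate_parenthesis_alt (sentence : String) : String :=
  PySem.Str.replace (PySem.Str.replace sentence "(" " ( ") ")" " ) "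

-- ===== PRECONDITION & SPEC =====
def Spec_separate_parenthesis (sentence : String) (out : String) : Prop := out = separate_parenthesis_alt sentence
instance (sentence : String) (out : String) : Decidable (Spec_separate_parenthesis sentence out) := by unfold Spec_separate_parenthesis; infer_instance

-- ===== CLAIM (what is proved, stated in full; the proofs are below) =====
def Claim_equal_separate_parenthesis : Prop := ∀ (sentence : String), Dom_separate_parenthesis sentence → Spec_separate_parenthesis sentence (separate_parenthesis sentence)

-- ===== LEMMAS AND PROOFS =====

-- single-character replace is a flatMap
theorem replace_single_go (c : Char) (new : List Char) :
    ∀ (l : List Char) (fuel : Nat) (acc : List Char), l.length ≤ fuel →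
      PySem.Chars.replace.go [c] new fuel l acc
        = acc.reverse ++ l.flatMap (fun x => if x = c then new else [x]) := by
  intro l
  induction l with
  | nil =>
      intro fuel acc _
      cases fuel <;> simp [PySem.Chars.replace.go]
  | cons c' t ih =>
      intro fuel acc h
      cases fuel with
      | zero => simp at h
      | succ n =>
          by_cases hc : c' = c
          · subst hc
            simp only [PySem.Chars.replace.go, List.isPrefixOf,
              beq_self_eq_true, Bool.true_and, if_pos]
            simp only [List.length_cons, List.length_nil, List.drop_succ_cons, List.drop_zero]
            rw [ih n (new.reverse ++ acc) (by simpa using h)]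
            simp
          · have : List.isPrefixOf [c] (c' :: t) = false := by
              simp [List.isPrefixOf]
              intro h'; exact absurd h'.symm hc
            simp only [PySem.Chars.replace.go, this, Bool.false_eq_true]
            rw [ih n (c' :: acc) (by simpa using h)]
            simp [hc]

theorem replace_single (c : Char) (new l : List Char) :
    PySem.Chars.replace l [c] new = l.flatMap (fun x => if x = c then new else [x]) := by
  simpa using replace_single_go c new l l.length [] le_rfl

-- A's fold, characterised as a flatMap on the character list
theorem foldA_chars (l : List Char) :
    ∀ (acc : String),
      (l.foldl
        (fun new_sentence ch =>
          if ch == '(' || ch == ')' then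
            new_sentence ++ (" " ++ String.ofList [ch] ++ " ")
          else
            new_sentence ++ String.ofList [ch]) acc).toList
      = acc.toList ++ l.flatMap (fun ch => if ch = '(' ∨ ch = ')' then [' ', ch, ' '] else [ch]) := by
  induction l with
  | nil => intro acc; simp
  | cons ch t ih =>
      intro acc
      rw [List.foldl_cons]
      by_cases h : ch = '(' ∨ ch = ')'
      · have hb : (ch == '(' || ch == ')') = true := by
          rcases h with h | h <;> simp [h]
        simp only [hb]
        rw [if_pos trivial, ih]
        simp [h]
      · have hb : (ch == '(' || ch == ')') = false := by
          push Not at h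
          simp [h.1, h.2]
        simp only [hb]
        rw [if_neg (by simp), ih]
        simp [h]

-- ===== VERDICT (by name: the statement is the Claim_ definition above) =====
theorem separate_parenthesis_spec : Claim_equal_separate_parenthesis := by
  intro s _
  unfold Spec_separate_parenthesis separate_parenthesis separate_parenthesis_alt
  apply String.toList_injective
  rw [foldA_chars]
  simp only [PySem.Str.toList_replace]
  have h1 : ("(" : String).toList = ['('] := rfl
  have h2 : (")" : String).toList = [')'] := rfl
  have h3 : (" ( " : String).toList = [' ', '(', ' '] := rfl
  have h4 : (" ) " : String).toList = [' ', ')', ' '] := rfl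
  rw [h1, h2, h3, h4, replace_single, replace_single, List.flatMap_assoc]
  simp only [String.toList_empty, List.nil_append]
  apply List.flatMap_congr
  intro ch _
  by_cases hp : ch = '('
  · subst hp; decide
  · by_cases hq : ch = ')'
    · subst hq; decide
    · simp [hp, hq]
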